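-- pv_equiv track=rewrite | github.com/darredondo/TSP_repositorio2022 | ProyectoColab/funciones.py | funcionListaClasificados
-- ===== SOURCE A (Python) =====
-- def funcionListaClasificados(lista):
--     pos = 0
--     neu = 0
--     neg = 0
--     for num in lista:
--         if num < 0:
--             neg += 1
--
--         elif num == 0:
--             neu +=1
--
--         else:
--             pos +=1
--     array = [neg, neu, pos]
--     return array
-- ===== SOURCE B (Python) =====
-- def funcionListaClasificados(lista):
--     neg = sum(1 for x in lista if x < 0)
--     neu = lista.count(0)
--     return [neg, neu, len(lista) - neg - neu]
-- ===== Notes on version B (the rewrite author's own statement) =====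
-- stated objective: simpler
-- what changed: Replaces the single three-branch accumulator loop with independent counts (a filtered sum for negatives, list.count for zeros) and derives the positive bucket arithmetically as len - neg - neu.
import Mathlib
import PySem

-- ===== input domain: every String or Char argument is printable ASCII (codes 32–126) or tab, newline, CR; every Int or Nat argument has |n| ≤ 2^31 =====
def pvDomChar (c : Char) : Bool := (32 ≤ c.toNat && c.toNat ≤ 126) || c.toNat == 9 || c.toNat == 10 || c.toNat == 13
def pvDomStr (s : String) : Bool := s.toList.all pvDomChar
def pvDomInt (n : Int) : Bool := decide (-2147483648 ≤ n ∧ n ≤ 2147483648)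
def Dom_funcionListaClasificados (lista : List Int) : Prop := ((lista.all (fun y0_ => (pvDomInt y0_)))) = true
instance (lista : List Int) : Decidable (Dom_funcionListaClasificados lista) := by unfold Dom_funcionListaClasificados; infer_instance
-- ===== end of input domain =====

-- ===== PORT A =====
-- B counts each bucket independently (countP for negatives, count for zeros) and derives
-- positives as length - neg - neu, instead of A's single three-branch accumulator loop.
-- loop body of A: state (pos, neu, neg)
def aStep (acc : Int × Int × Int) (num : Int) : Int × Int × Int :=
  if num < 0 then (acc.1, acc.2.1, acc.2.2 + 1)
  else if num == 0 then (acc.1, acc.2.1 + 1, acc.2.2)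
  else (acc.1 + 1, acc.2.1, acc.2.2)

def funcionListaClasificados (lista : List Int) : List Int :=
  let s := lista.foldl aStep (0, 0, 0)
  [s.2.2, s.2.1, s.1]

-- ===== PORT B =====
def funcionListaClasificados_alt (lista : List Int) : List Int :=
  let neg : Int := lista.countP (fun x => decide (x < 0))
  let neu : Int := lista.count 0
  [neg, neu, (lista.length : Int) - neg - neu]

-- ===== PRECONDITION & SPEC =====
def Spec_funcionListaClasificados (lista : List Int) (out : List Int) : Prop := out = funcionListaClasificados_alt lista
instance (lista : List Int) (out : List Int) : Decidable (Spec_funcionListaClasificados lista out) := by unfold Spec_funcionListaClasificados; infer_instance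

-- ===== CLAIM (what is proved, stated in full; the proofs are below) =====
def Claim_equal_funcionListaClasificados : Prop := ∀ (lista : List Int), Dom_funcionListaClasificados lista → Spec_funcionListaClasificados lista (funcionListaClasificados lista)

-- ===== LEMMAS AND PROOFS =====

lemma loop_inv (lista : List Int) (pos neu neg : Int) :
    lista.foldl aStep (pos, neu, neg)
    = (pos + ((lista.length : Int) - lista.countP (fun x => decide (x < 0)) - lista.count 0),
       neu + (lista.count 0 : Int),
       neg + (lista.countP (fun x => decide (x < 0)) : Int)) := by
  induction lista generalizing pos neu neg with
  | nil => simp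
  | cons h t ih =>
    rw [List.foldl_cons]
    by_cases h1 : h < 0
    · have hz : h ≠ 0 := by omega
      rw [show aStep (pos, neu, neg) h = (pos, neu, neg + 1) by simp [aStep, h1], ih]
      simp [h1, hz]
      ring
    · by_cases h2 : h = 0
      · rw [show aStep (pos, neu, neg) h = (pos, neu + 1, neg) by simp [aStep, h2], ih]
        simp [h2]
        constructor <;> ring
      · rw [show aStep (pos, neu, neg) h = (pos + 1, neu, neg) by simp [aStep, h1, h2], ih]
        simp [h1, h2]
        ring

-- ===== VERDICT (by name: the statement is the Claim_ definition above) =====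
theorem funcionListaClasificados_spec : Claim_equal_funcionListaClasificados := by
  intro lista _
  unfold Spec_funcionListaClasificados funcionListaClasificados funcionListaClasificados_alt
  rw [loop_inv]
  simp
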